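-- pv_equiv track=rewrite | github.com/Pruthuvi001/TNE20003_Internet-and-Cybersecurity-for-Engineering-Applications_Swinburne_2023 | Lab 07 D/lab07d.py | extract_images
-- ===== SOURCE A (Python) =====
-- def extract_images(html_content):
--     img_tags = []
--     start = 0
--     while True:
--         start = html_content.find('<img', start)
--         if start == -1:
--             break
--         end = html_content.find('>', start)
--         if end == -1:
--             break
--         img_tags.append(html_content[start:end + 1])
--         start = end + 1
--     return img_tags
-- ===== SOURCE B (Python) =====
-- def extract_images(html_content):
--     # single left-to-right pass with an explicit "inside a tag" state,
--     # instead of repeated find() calls with index bookkeeping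
--     tags = []
--     tag = None          # chars of the tag being collected, or None
--     i, n = 0, len(html_content)
--     while i < n:
--         if tag is None:
--             if html_content.startswith('<img', i):
--                 tag = ['<', 'i', 'm', 'g']
--                 i += 4
--             else:
--                 i += 1
--         else:
--             c = html_content[i]
--             tag.append(c)
--             i += 1
--             if c == '>':
--                 tags.append(''.join(tag))
--                 tag = None
--     return tags
-- ===== Notes on version B (the rewrite author's own statement) =====
-- stated objective: alternative
-- what changed: Replaced the repeated find('<img')/find('>') calls with explicit start/end index bookkeeping by a single left-to-right state-machine pass that switches between 'scanning' and 'collecting a tag' states.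
import Mathlib
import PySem

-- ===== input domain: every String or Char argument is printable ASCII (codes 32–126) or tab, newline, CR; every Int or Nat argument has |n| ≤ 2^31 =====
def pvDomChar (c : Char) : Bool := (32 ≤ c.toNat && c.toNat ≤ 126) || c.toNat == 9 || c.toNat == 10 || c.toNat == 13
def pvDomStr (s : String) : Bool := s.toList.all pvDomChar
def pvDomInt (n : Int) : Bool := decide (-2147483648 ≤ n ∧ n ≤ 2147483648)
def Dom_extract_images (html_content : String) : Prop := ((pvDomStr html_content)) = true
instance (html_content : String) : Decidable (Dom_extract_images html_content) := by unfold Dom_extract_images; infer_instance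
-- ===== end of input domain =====

-- B replaces A's find()-based start/end index bookkeeping with a single-pass two-state scan (scanning vs collecting-a-tag); alternative, same cost.


def pvImg : List Char := ['<', 'i', 'm', 'g']
def pvGt : List Char := ['>']

-- ===== PORT A =====
-- A's while-True loop: find '<img' from start, find '>' from there, slice out the tag, continue
-- just past the '>'.  The loop is driven by a fuel counter only to make the recursion structural
-- (length+1 is always enough: start strictly increases and stays ≤ length); it never changes the value.
def pvLoopA (cs : List Char) : Nat → Nat → List (List Char)
  | _, 0 => []
  | start, fuel + 1 =>
    let p := PySem.Chars.findFrom cs pvImg (start : Int)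
    if p = -1 then []
    else
      let e := PySem.Chars.findFrom cs pvGt p
      if e = -1 then []
      else PySem.Chars.slice cs (some p) (some (e + 1)) :: pvLoopA cs (e.toNat + 1) fuel

def extract_images (html_content : String) : List String :=
  (pvLoopA html_content.toList 0 (html_content.toList.length + 1)).map String.ofList

-- ===== PORT B =====
-- B's "collecting" state (tag is not None): append chars to the current tag until (and including)
-- the first '>'; none = the string ends inside an unterminated tag, which is discarded.
def pvGrab : List Char → List Char → Option (List Char × List Char)
  | [], _ => none
  | c :: rest, acc => if c = '>' then some (acc ++ [c], rest) else pvGrab rest (acc ++ [c])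

-- termination helper for pvScan (the collecting state always consumes at least the '>')
theorem pvGrab_length_lt : ∀ (l acc t r : List Char), pvGrab l acc = some (t, r) → r.length < l.length := by
  intro l
  induction l with
  | nil => intro acc t r h; simp [pvGrab] at h
  | cons c rest ih =>
    intro acc t r h
    by_cases hc : c = '>'
    · simp [pvGrab, hc] at h
      simp [← h.2]
    · simp [pvGrab, hc] at h
      have := ih _ _ _ h
      simpa using Nat.lt_succ_of_lt this

-- B's "scanning" state (tag is None): advance one char at a time; on '<img' switch to collecting.
def pvScan : List Char → List (List Char)
  | [] => []
  | c :: rest =>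
    if pvImg.isPrefixOf (c :: rest) then
      match hg : pvGrab (rest.drop 3) pvImg with
      | some (t, r) => t :: pvScan r
      | none => []
    else
      pvScan rest
termination_by l => l.length
decreasing_by
  · have h1 := pvGrab_length_lt _ _ _ _ hg
    simp only [List.length_drop, List.length_cons] at h1 ⊢
    omega
  · simp

def extract_images_alt (html_content : String) : List String :=
  (pvScan html_content.toList).map String.ofList

-- ===== PRECONDITION & SPEC =====
def Spec_extract_images (html_content : String) (out : List String) : Prop := out = extract_images_alt html_content
instance (html_content : String) (out : List String) : Decidable (Spec_extract_images html_content out) := by unfold Spec_extract_images; infer_instance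

-- ===== CLAIM (what is proved, stated in full; the proofs are below) =====
def Claim_equal_extract_images : Prop := ∀ (html_content : String), Dom_extract_images html_content → Spec_extract_images html_content (extract_images html_content)

-- ===== LEMMAS AND PROOFS =====

theorem singleton_prefix_drop (c : Char) (l : List Char) (i : Nat) :
    ([c] <+: l.drop i) ↔ l[i]? = some c := by
  rw [← List.head?_drop]
  cases l.drop i <;> simp [List.prefix_cons_iff, eq_comm]
theorem pvGrab_none (l : List Char) : ∀ acc, '>' ∉ l → pvGrab l acc = none := by
  induction l with
  | nil => intro acc _; rfl
  | cons c rest ih =>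
    intro acc h
    simp only [List.mem_cons, not_or] at h
    simp [pvGrab, Ne.symm h.1, ih _ h.2]
theorem pvGrab_some (l : List Char) : ∀ acc (j : Nat), l[j]? = some '>' →
    (∀ i < j, l[i]? ≠ some '>') →
    pvGrab l acc = some (acc ++ l.take (j + 1), l.drop (j + 1)) := by
  induction l with
  | nil => intro acc j h; simp at h
  | cons c rest ih =>
    intro acc j h hmin
    cases j with
    | zero =>
      simp at h
      simp [pvGrab, h]
    | succ j =>
      have hc : c ≠ '>' := by
        have := hmin 0 (Nat.succ_pos _)
        simpa using this
      simp only [List.getElem?_cons_succ] at h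
      have hmin' : ∀ i < j, rest[i]? ≠ some '>' := by
        intro i hi
        have := hmin (i + 1) (by omega)
        simpa using this
      simp [pvGrab, hc, ih (acc ++ [c]) j h hmin']
theorem pvScan_cons_not (c : Char) (rest : List Char) (h : ¬ pvImg <+: c :: rest) :
    pvScan (c :: rest) = pvScan rest := by
  rw [pvScan]
  simp [List.isPrefixOf_iff_prefix, h]
theorem pvScan_skip (k : Nat) : ∀ l : List Char,
    (∀ i < k, ¬ pvImg <+: l.drop i) → pvScan l = pvScan (l.drop k) := by
  induction k with
  | zero => simp
  | succ k ih =>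
    intro l h
    cases l with
    | nil => simp
    | cons c rest =>
      rw [pvScan_cons_not c rest (by simpa using h 0 (Nat.succ_pos _))]
      rw [List.drop_succ_cons]
      exact ih rest (fun i hi => by simpa using h (i + 1) (by omega))
theorem pvScan_nil_of_not_infix (l : List Char) (h : ¬ pvImg <:+: l) : pvScan l = [] := by
  induction l with
  | nil => simp [pvScan]
  | cons c rest ih =>
    rw [pvScan_cons_not c rest (fun hp => h hp.isInfix)]
    exact ih (fun hi => h (hi.trans (List.suffix_cons c rest).isInfix))
theorem pvScan_match (rest : List Char) :
    pvScan (pvImg ++ rest) = match pvGrab rest pvImg with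
      | some (t, r) => t :: pvScan r
      | none => [] := by
  show pvScan ('<' :: 'i' :: 'm' :: 'g' :: rest) = _
  rw [pvScan]
  have hpre : pvImg.isPrefixOf ('<' :: 'i' :: 'm' :: 'g' :: rest) = true := by
    simp [pvImg, List.isPrefixOf]
  simp only [hpre, if_true]
  split
  next t r heq =>
    rw [show List.drop 3 ('i' :: 'm' :: 'g' :: rest) = rest from rfl] at heq
    simp [heq]
  next heq =>
    rw [show List.drop 3 ('i' :: 'm' :: 'g' :: rest) = rest from rfl] at heq
    simp [heq]

theorem pvLoopA_eq_pvScan (cs : List Char) : ∀ fuel start, start ≤ cs.length →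
    cs.length - start < fuel → pvLoopA cs start fuel = pvScan (cs.drop start) := by
  intro fuel
  induction fuel with
  | zero => intro start h1 h2; omega
  | succ fuel ih =>
    intro start hstart hfuel
    rw [pvLoopA]
    rw [PySem.Chars.findFrom_natCast cs pvImg start hstart]
    by_cases hf : PySem.Chars.find (cs.drop start) pvImg = -1
    · rw [if_pos hf, if_pos rfl]
      exact (pvScan_nil_of_not_infix _ ((PySem.Chars.find_eq_neg_one_iff _ _).mp hf)).symm
    · have hf0 : 0 ≤ PySem.Chars.find (cs.drop start) pvImg := by
        have := PySem.Chars.neg_one_le_find (cs.drop start) pvImg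
        omega
      obtain ⟨hpre1, hmin1⟩ := PySem.Chars.find_spec (s := cs.drop start) (sub := pvImg) hf0
      set fN := (PySem.Chars.find (cs.drop start) pvImg).toNat with hfN
      have hfeq : PySem.Chars.find (cs.drop start) pvImg = (fN : Int) := by omega
      rw [hfeq, if_neg (show ¬((fN : Int) = -1) by omega)]
      have hcast : ((start : Int) + (fN : Int)) = ((start + fN : Nat) : Int) := by push_cast; ring
      rw [if_neg (by omega), hcast]
      have himg : pvImg <+: cs.drop (start + fN) := by
        rw [← List.drop_drop]; exact hpre1
      have hlen4 : start + fN + 4 ≤ cs.length := by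
        have h1 := himg.length_le
        simp [pvImg] at h1
        omega
      rw [PySem.Chars.findFrom_natCast cs pvGt (start + fN) (by omega)]
      have hskip : pvScan (cs.drop start) = pvScan (cs.drop (start + fN)) := by
        rw [show cs.drop (start + fN) = (cs.drop start).drop fN from (List.drop_drop).symm]
        exact pvScan_skip fN (cs.drop start) hmin1
      obtain ⟨rest, hrest⟩ := himg
      by_cases hg : PySem.Chars.find (cs.drop (start + fN)) pvGt = -1
      · rw [if_pos hg, if_pos rfl, hskip, ← hrest, pvScan_match]
        have hmem : '>' ∉ rest := by
          intro hm
          have : pvGt <:+: cs.drop (start + fN) := by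
            rw [← hrest]
            exact (List.singleton_infix_iff _ _).mpr (List.mem_append_right _ hm)
          exact ((PySem.Chars.find_eq_neg_one_iff _ _).mp hg) this
        rw [pvGrab_none rest pvImg hmem]
      · have hg0 : 0 ≤ PySem.Chars.find (cs.drop (start + fN)) pvGt := by
          have := PySem.Chars.neg_one_le_find (cs.drop (start + fN)) pvGt
          omega
        obtain ⟨hpre2, hmin2⟩ := PySem.Chars.find_spec (s := cs.drop (start + fN)) (sub := pvGt) hg0
        set gN := (PySem.Chars.find (cs.drop (start + fN)) pvGt).toNat with hgN
        have hgeq : PySem.Chars.find (cs.drop (start + fN)) pvGt = (gN : Int) := by omega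
        rw [hgeq, if_neg (show ¬((gN : Int) = -1) by omega), if_neg (by omega)]
        -- the '>' found at offset gN, and none earlier
        have hgt : (cs.drop (start + fN))[gN]? = some '>' := by
          rw [← singleton_prefix_drop]
          rw [← List.drop_drop] at hpre2 ⊢
          exact hpre2
        have hmin2' : ∀ i < gN, (cs.drop (start + fN))[i]? ≠ some '>' := by
          intro i hi h
          exact hmin2 i hi ((singleton_prefix_drop '>' (cs.drop (start + fN)) i).mpr h)
        have hglt : start + fN + gN < cs.length := by
          obtain ⟨hlt, -⟩ := List.getElem?_eq_some_iff.mp hgt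
          simp only [List.length_drop] at hlt
          omega
        have h4 : 4 ≤ gN := by
          by_contra hlt
          have h := hgt
          rw [← hrest, List.getElem?_append_left (by simp [pvImg]; omega)] at h
          interval_cases gN <;> simp [pvImg] at h
        have hgt' : rest[gN - 4]? = some '>' := by
          have h := hgt
          rw [← hrest, List.getElem?_append_right (by simp [pvImg]; omega)] at h
          simpa [pvImg] using h
        have hminr : ∀ i < gN - 4, rest[i]? ≠ some '>' := by
          intro i hi
          have h := hmin2' (i + 4) (by omega)
          rw [← hrest, List.getElem?_append_right (by simp [pvImg])] at h
          simpa [pvImg] using h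
        have hgrab := pvGrab_some rest pvImg (gN - 4) hgt' hminr
        rw [hskip, ← hrest, pvScan_match, hgrab]
        have hcast2 : ((start + fN : Nat) : Int) + (gN : Int) + 1 = ((start + fN + gN + 1 : Nat) : Int) := by
          push_cast; ring
        have hcast3 : (((start + fN : Nat) : Int) + (gN : Int)).toNat + 1 = start + fN + gN + 1 := by
          omega
        rw [PySem.Chars.slice_eq_listSlice, hcast2, hcast3,
          PySem.List.slice_natCast cs (start + fN) (start + fN + gN + 1)]
        have hdropeq : List.drop (start + fN + gN + 1) cs = rest.drop (gN - 4 + 1) := by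
          rw [show start + fN + gN + 1 = (start + fN) + (gN + 1) by ring, ← List.drop_drop, ← hrest,
            List.drop_append, List.drop_eq_nil_of_le (by simp [pvImg]; omega)]
          simp [pvImg]
          congr 1
          omega
        have htake : List.take (start + fN + gN + 1 - (start + fN)) (List.drop (start + fN) cs)
            = pvImg ++ rest.take (gN - 4 + 1) := by
          rw [show start + fN + gN + 1 - (start + fN) = gN + 1 by omega, ← hrest, List.take_append,
            List.take_of_length_le (by simp [pvImg]; omega)]
          congr 2
          simp [pvImg]
          omega
        rw [htake, ih (start + fN + gN + 1) (by omega) (by omega), hdropeq]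

-- ===== VERDICT (by name: the statement is the Claim_ definition above) =====
theorem extract_images_spec : Claim_equal_extract_images := by
  intro s _
  unfold Spec_extract_images extract_images extract_images_alt
  rw [pvLoopA_eq_pvScan s.toList (s.toList.length + 1) 0 (Nat.zero_le _) (by omega)]
  simp
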